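-- pv_equiv track=rewrite | github.com/tooooo1/programmers | 짝지어 제거하기.py | solution
-- ===== SOURCE A (Python) =====
-- def solution(s):
--     while len(s):
--         flag = True
--         for i in range(len(s)):
--             if s[i]+s[i] in s:
--                 s = s.replace(s[i]+s[i],'')
--                 flag = False
--                 break
--         if flag:
--             return 0
--
--     return 1
-- ===== SOURCE B (Python) =====
-- def solution(s):
--     stack = []
--     for ch in s:
--         if stack and stack[-1] == ch:
--             stack.pop()
--         else:
--             stack.append(ch)
--     return 1 if not stack else 0
-- ===== Notes on version B (the rewrite author's own statement) =====
-- stated objective: faster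
-- what changed: Replaced the repeated scan-for-a-doubled-character-and-global-replace loop with a single left-to-right pass maintaining a stack that pops on a matching top character (adjacent-pair cancellation is confluent, so the stack normal form decides full reducibility).
import Mathlib
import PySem

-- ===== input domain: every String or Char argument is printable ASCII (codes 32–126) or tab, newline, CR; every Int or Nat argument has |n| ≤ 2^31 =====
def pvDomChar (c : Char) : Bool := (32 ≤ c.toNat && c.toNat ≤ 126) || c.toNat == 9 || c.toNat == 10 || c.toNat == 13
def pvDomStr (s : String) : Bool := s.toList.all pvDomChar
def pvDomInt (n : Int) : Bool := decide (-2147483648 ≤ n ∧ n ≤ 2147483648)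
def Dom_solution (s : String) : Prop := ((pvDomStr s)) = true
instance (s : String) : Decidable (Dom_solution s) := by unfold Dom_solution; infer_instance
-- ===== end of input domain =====

-- B replaces A's repeated "find a doubled character, str.replace it everywhere" loop by a
-- single linear stack pass (pop on matching top, empty stack at the end ⇒ 1).

-- ===== PORT A =====
-- inner for-loop: for i in range(len(s)): if s[i]+s[i] in s: … break — scanning i over the
-- positions of s is scanning over its characters; returns the first doubled character found.
def scanA (s : List Char) : List Char → Option Char
  | [] => none
  | a :: rest => if PySem.Chars.isIn [a, a] s then some a else scanA s rest

-- termination lemmas for the while-loop: a successful replace strictly shrinks the string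
lemma scanA_some_isIn (s : List Char) : ∀ (l : List Char) (c : Char),
    scanA s l = some c → PySem.Chars.isIn [c, c] s = true := by
  intro l
  induction l with
  | nil => intro c h; simp [scanA] at h
  | cons a rest ih =>
    intro c h
    by_cases hin : PySem.Chars.isIn [a, a] s = true
    · simp [scanA, hin] at h; subst h; exact hin
    · simp [scanA, hin] at h; exact ih c h

lemma go_length_le (c : Char) : ∀ (fuel : Nat) (l acc : List Char),
    (PySem.Chars.replace.go [c, c] [] fuel l acc).length ≤ acc.length + l.length := by
  intro fuel
  induction fuel with
  | zero => intro l acc; rw [PySem.Chars.replace.go]; simp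
  | succ n ih =>
    intro l acc
    match l with
    | [] =>
      rw [PySem.Chars.replace.go] <;> simp
    | a :: t =>
      rw [PySem.Chars.replace.go]
      by_cases hp : [c, c].isPrefixOf (a :: t) = true
      · simp only [hp, if_true]
        have hpre : [c, c] <+: a :: t := List.isPrefixOf_iff_prefix.mp hp
        obtain ⟨r, hr⟩ := hpre
        have heq : a :: t = c :: c :: r := by simpa using hr.symm
        rw [heq]
        have h1 := ih r acc
        simp only [List.reverse_nil, List.nil_append, List.length_cons] at *
        calc (PySem.Chars.replace.go [c, c] [] n (List.drop ([c,c]).length (c :: c :: r)) acc).length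
            = (PySem.Chars.replace.go [c, c] [] n r acc).length := by norm_num
          _ ≤ acc.length + r.length := h1
          _ ≤ acc.length + (r.length + 1 + 1) := by omega
      · simp only [hp]
        have h1 := ih t (a :: acc)
        simp at h1 ⊢
        omega

lemma go_length_lt (c : Char) : ∀ (fuel : Nat) (l acc : List Char),
    [c, c] <:+: l → l.length ≤ fuel →
    (PySem.Chars.replace.go [c, c] [] fuel l acc).length < acc.length + l.length := by
  intro fuel
  induction fuel with
  | zero =>
    intro l acc hinf hlen
    have : l = [] := List.length_eq_zero_iff.mp (Nat.le_zero.mp hlen)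
    subst this
    simp at hinf
  | succ n ih =>
    intro l acc hinf hlen
    match l with
    | [] => simp at hinf
    | a :: t =>
      rw [PySem.Chars.replace.go]
      by_cases hp : [c, c].isPrefixOf (a :: t) = true
      · simp only [hp, if_true]
        have hpre : [c, c] <+: a :: t := List.isPrefixOf_iff_prefix.mp hp
        obtain ⟨r, hr⟩ := hpre
        have heq : a :: t = c :: c :: r := by simpa using hr.symm
        rw [heq]
        have h1 := go_length_le c n r acc
        simp only [List.reverse_nil, List.nil_append, List.length_cons]
        calc (PySem.Chars.replace.go [c, c] [] n (List.drop ([c,c]).length (c :: c :: r)) acc).length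
            = (PySem.Chars.replace.go [c, c] [] n r acc).length := by norm_num
          _ ≤ acc.length + r.length := h1
          _ < acc.length + (r.length + 1 + 1) := by omega
      · simp only [hp]
        have hnp : ¬ [c, c] <+: a :: t := fun h => hp (List.isPrefixOf_iff_prefix.mpr h)
        have hint : [c, c] <:+: t := by
          rcases List.infix_cons_iff.mp hinf with h | h
          · exact absurd h hnp
          · exact h
        have h1 := ih t (a :: acc) hint (by simp at hlen ⊢; omega)
        simp at h1 ⊢
        omega

lemma replace_length_lt (c : Char) (s : List Char)
    (h : PySem.Chars.isIn [c, c] s = true) :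
    (PySem.Chars.replace s [c, c] []).length < s.length := by
  have hinf : [c, c] <:+: s := (PySem.Chars.isIn_iff_infix _ _).mp h
  unfold PySem.Chars.replace
  simp only [List.isEmpty_cons, Bool.false_eq_true, if_false]
  have := go_length_lt c s.length s [] hinf (le_refl _)
  simpa using this

-- the while-loop of A: each iteration scans for a doubled character and replaces all its
-- occurrences; flag staying True (scan finds nothing) returns 0, empty string returns 1.
def solLoopA (s : List Char) : Int :=
  if s = [] then 1
  else
    match h : scanA s s with
    | none => 0
    | some c => solLoopA (PySem.Chars.replace s [c, c] [])
termination_by s.length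
decreasing_by
  exact replace_length_lt c s (scanA_some_isIn s s c h)

def solution (s : String) : Int := solLoopA s.toList

-- ===== PORT B =====
-- one step of the stack pass: pop on matching top, else push
def stepB (st : List Char) (ch : Char) : List Char :=
  if st.head? = some ch then st.tail else ch :: st

def solution_alt (s : String) : Int :=
  if s.toList.foldl stepB [] = [] then 1 else 0

-- ===== PRECONDITION & SPEC =====
def Spec_solution (s : String) (out : Int) : Prop := out = solution_alt s
instance (s : String) (out : Int) : Decidable (Spec_solution s out) := by unfold Spec_solution; infer_instance

-- ===== CLAIM (what is proved, stated in full; the proofs are below) =====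
def Claim_equal_solution : Prop := ∀ (s : String), Dom_solution s → Spec_solution s (solution s)

-- ===== LEMMAS AND PROOFS =====

-- the stack never holds two equal adjacent characters
lemma isChain_stepB {st : List Char} (h : List.IsChain (· ≠ ·) st) (ch : Char) :
    List.IsChain (· ≠ ·) (stepB st ch) := by
  unfold stepB
  by_cases hh : st.head? = some ch
  · simp only [hh, if_true]; exact h.tail
  · simp only [hh, if_false]
    refine List.isChain_cons.mpr ⟨?_, h⟩
    intro y hy hchy
    exact hh (by rw [hy, hchy])

lemma isChain_foldl {st : List Char} (h : List.IsChain (· ≠ ·) st) (xs : List Char) :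
    List.IsChain (· ≠ ·) (xs.foldl stepB st) := by
  induction xs generalizing st with
  | nil => exact h
  | cons a t ih => exact ih (isChain_stepB h a)

-- cancelling a pair cc against a duplicate-free stack is a no-op
lemma stepB_stepB {st : List Char} (h : List.IsChain (· ≠ ·) st) (c : Char) :
    stepB (stepB st c) c = st := by
  match st with
  | [] => simp [stepB]
  | d :: t =>
    by_cases hdc : d = c
    · subst hdc
      have hth : t.head? ≠ some d := by
        intro hth
        match t, hth with
        | x :: u, hth =>
          have hx : d = x := by simpa using hth.symm
          exact (List.isChain_cons_cons.mp h).1 hx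
      simp [stepB, hth]
    · simp [stepB, hdc]

-- folding the replaced string equals folding the original (over any duplicate-free stack)
lemma go_foldl (c : Char) : ∀ (fuel : Nat) (l acc st : List Char),
    l.length ≤ fuel → List.IsChain (· ≠ ·) st →
    (PySem.Chars.replace.go [c, c] [] fuel l acc).foldl stepB st =
      l.foldl stepB (acc.reverse.foldl stepB st) := by
  intro fuel
  induction fuel with
  | zero =>
    intro l acc st hlen _
    have : l = [] := List.length_eq_zero_iff.mp (Nat.le_zero.mp hlen)
    subst this
    rw [PySem.Chars.replace.go]
    simp [List.foldl_append]
  | succ n ih =>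
    intro l acc st hlen hst
    match l with
    | [] =>
      rw [PySem.Chars.replace.go] <;> simp
    | a :: t =>
      rw [PySem.Chars.replace.go]
      by_cases hp : [c, c].isPrefixOf (a :: t) = true
      · simp only [hp, if_true]
        have hpre : [c, c] <+: a :: t := List.isPrefixOf_iff_prefix.mp hp
        obtain ⟨r, hr⟩ := hpre
        have heq : a :: t = c :: c :: r := by simpa using hr.symm
        rw [heq]
        simp only [List.reverse_nil, List.nil_append]
        have hlen' : r.length ≤ n := by
          have h2 : (a :: t).length ≤ n + 1 := hlen
          rw [heq] at h2; simp at h2; omega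
        have hdrop : List.drop ([c,c]).length (c :: c :: r) = r := by norm_num
        rw [hdrop, ih r acc st hlen' hst]
        simp only [List.foldl_cons]
        rw [stepB_stepB (isChain_foldl hst acc.reverse) c]
      · simp only [hp]
        have hlen' : t.length ≤ n := by simp at hlen; omega
        rw [if_neg (by simpa using hp), ih t (a :: acc) st hlen' hst]
        simp [List.foldl_append]

lemma replace_foldl (c : Char) (s st : List Char) (hst : List.IsChain (· ≠ ·) st) :
    (PySem.Chars.replace s [c, c] []).foldl stepB st = s.foldl stepB st := by
  unfold PySem.Chars.replace
  simp only [List.isEmpty_cons, Bool.false_eq_true, if_false]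
  have := go_foldl c s.length s [] st (le_refl _) hst
  simpa using this

-- when the scan finds nothing, no character of s is doubled anywhere in s
lemma scanA_none (s : List Char) : ∀ (l : List Char), scanA s l = none →
    ∀ a ∈ l, ¬ [a, a] <:+: s := by
  intro l
  induction l with
  | nil => intro _ a ha; simp at ha
  | cons b rest ih =>
    intro h a ha
    by_cases hin : PySem.Chars.isIn [b, b] s = true
    · simp [scanA, hin] at h
    · simp [scanA, hin] at h
      rcases List.mem_cons.mp ha with hab | ha'
      · subst hab
        intro hinf
        exact hin ((PySem.Chars.isIn_iff_infix _ _).mpr hinf)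
      · exact ih h a ha'

-- a string with no doubled substring has no equal adjacent characters
lemma isChain_of_no_pair : ∀ (s : List Char), (∀ a ∈ s, ¬ [a, a] <:+: s) →
    List.IsChain (· ≠ ·) s := by
  intro s
  induction s with
  | nil => intro _; simp
  | cons a t ih =>
    intro h
    match t with
    | [] => simp
    | b :: u =>
      refine List.isChain_cons_cons.mpr ⟨?_, ?_⟩
      · intro hab
        subst hab
        exact h a (by simp) ⟨[], u, by simp⟩
      · refine ih ?_
        intro x hx hinf
        exact h x (by simp [hx]) (hinf.trans (List.suffix_cons a (b :: u)).isInfix)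

-- over a duplicate-free string the stack pass just reverses it onto the stack
lemma foldl_of_isChain : ∀ (s st : List Char), List.IsChain (· ≠ ·) s →
    (∀ x y, s.head? = some x → st.head? = some y → x ≠ y) →
    s.foldl stepB st = s.reverse ++ st := by
  intro s
  induction s with
  | nil => intro st _ _; simp
  | cons a t ih =>
    intro st hch hhd
    have hpush : stepB st a = a :: st := by
      unfold stepB
      have hne : st.head? ≠ some a := by
        intro hst
        exact hhd a a rfl hst rfl
      simp [hne]
    simp only [List.foldl_cons, hpush]
    rw [ih (a :: st) (List.isChain_cons.mp hch).2 ?_]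
    · simp
    · intro x y hx hy
      have hya : y = a := by simpa using hy.symm
      subst hya
      intro hxy
      exact (List.isChain_cons.mp hch).1 x hx hxy.symm

-- the while-loop computes exactly the stack test
lemma solLoopA_eq : ∀ (s : List Char),
    solLoopA s = (if s.foldl stepB [] = [] then 1 else 0) := by
  intro s
  induction hwf : s.length using Nat.strong_induction_on generalizing s with
  | _ n ih =>
    subst hwf
    unfold solLoopA
    by_cases hnil : s = []
    · simp [hnil]
    · simp only [hnil, if_false]
      split
      · rename_i hscan
        have hnp := scanA_none s s hscan
        have hch := isChain_of_no_pair s hnp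
        rw [foldl_of_isChain s [] hch (by intro x y _ hy; simp at hy)]
        simp [hnil]
      · rename_i c hscan
        have hin := scanA_some_isIn s s c hscan
        have hlt := replace_length_lt c s hin
        rw [ih _ hlt _ rfl]
        rw [replace_foldl c s [] (by simp)]

-- ===== VERDICT (by name: the statement is the Claim_ definition above) =====
theorem solution_spec : Claim_equal_solution := by
  intro s _
  unfold Spec_solution solution solution_alt
  exact solLoopA_eq s.toList
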